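-- pv_equiv track=rewrite | github.com/Shaurya-Tech123/DeadOPT-Dead-Code-Eliminator-Code-Optimizer | optimizer/cpp_optimizer.py | remove_unused_includes
-- ===== SOURCE A (Python) =====
-- def remove_unused_includes(code):
--     """Remove obviously unused includes (basic heuristic)"""
--     lines = code.split('\n')
--     include_lines = []
--     other_lines = []
--
--     for line in lines:
--         if line.strip().startswith('#include'):
--             include_lines.append(line)
--         else:
--             other_lines.append(line)
--
--     # Keep all includes for now (conservative approach)
--     # In a real implementation, you'd analyze which headers are actually used
--     return '\n'.join(include_lines + other_lines)
-- ===== SOURCE B (Python) =====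
-- def remove_unused_includes(code):
--     """Remove obviously unused includes (basic heuristic)"""
--     return '\n'.join(sorted(code.split('\n'),
--                             key=lambda line: not line.strip().startswith('#include')))
-- ===== Notes on version B (the rewrite author's own statement) =====
-- stated objective: simpler
-- what changed: Replaced the two-accumulator partition loop with a single stable sort on a boolean key (include lines first), relying on sort stability to preserve each group's original order.
import Mathlib
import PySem

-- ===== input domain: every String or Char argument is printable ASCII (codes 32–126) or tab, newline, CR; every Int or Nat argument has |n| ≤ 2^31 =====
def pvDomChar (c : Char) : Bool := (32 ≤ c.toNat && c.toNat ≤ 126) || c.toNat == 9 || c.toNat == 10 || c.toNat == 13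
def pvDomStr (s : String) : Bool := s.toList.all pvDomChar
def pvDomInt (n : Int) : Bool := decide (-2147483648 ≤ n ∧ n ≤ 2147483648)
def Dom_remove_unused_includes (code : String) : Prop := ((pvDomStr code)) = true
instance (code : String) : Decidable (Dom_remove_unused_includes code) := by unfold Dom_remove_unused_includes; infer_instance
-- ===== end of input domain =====

-- B replaces A's two-accumulator partition loop by one stable sort on a boolean key (simpler, one expression).

-- ===== PORT A =====
-- line.strip().startswith('#include')
def pvIsInclude (line : String) : Bool :=
  PySem.Str.startswith (PySem.Str.strip line) "#include"

def remove_unused_includes (code : String) : String :=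
  let lines := (PySem.Str.split? code "\n").getD []   -- code.split('\n'); sep ≠ "" so split? is always some
  let st : List String × List String := lines.foldl
    (fun (acc : List String × List String) line =>
      if pvIsInclude line then (acc.1 ++ [line], acc.2)
      else (acc.1, acc.2 ++ [line]))
    ([], [])
  PySem.Str.join "\n" (st.1 ++ st.2)

-- ===== PORT B =====
def remove_unused_includes_alt (code : String) : String :=
  PySem.Str.join "\n"
    (PySem.List.sorted ((PySem.Str.split? code "\n").getD []) (fun line => !pvIsInclude line) false)

-- ===== PRECONDITION & SPEC =====
def Spec_remove_unused_includes (code : String) (out : String) : Prop := out = remove_unused_includes_alt code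
instance (code : String) (out : String) : Decidable (Spec_remove_unused_includes code out) := by unfold Spec_remove_unused_includes; infer_instance

-- ===== CLAIM (what is proved, stated in full; the proofs are below) =====
def Claim_equal_remove_unused_includes : Prop := ∀ (code : String), Dom_remove_unused_includes code → Spec_remove_unused_includes code (remove_unused_includes code)

-- ===== LEMMAS AND PROOFS =====

-- A's loop is the partition: accumulators collect the p-true and p-false lines in order.
theorem pvFoldl_partition (p : String → Bool) (xs : List String) (F T : List String) :
    xs.foldl
      (fun (acc : List String × List String) line =>
        if p line then (acc.1 ++ [line], acc.2) else (acc.1, acc.2 ++ [line]))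
      (F, T)
      = (F ++ xs.filter p, T ++ xs.filter (fun l => !p l)) := by
  induction xs generalizing F T with
  | nil => simp
  | cons x xs ih =>
      by_cases h : p x = true <;> simp [List.foldl_cons, h, ih] <;> simp [List.append_assoc]

-- Inserting an element whose key is false: it walks past the all-false prefix and lands
-- before the first true-key element (specific to the boolean-key insertion in B's sort).
theorem pvInsertBy_false (key : String → Bool) (x : String) (hx : key x = false)
    (A B : List String) (hA : ∀ a ∈ A, key a = false) (hB : ∀ b ∈ B, key b = true) :
    PySem.List.insertBy (fun a b => decide (key a < key b)) x (A ++ B)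
      = (A ++ [x]) ++ B := by
  induction A with
  | nil =>
      cases B with
      | nil => simp [PySem.List.insertBy]
      | cons b bs =>
          have := hB b (by simp)
          simp [PySem.List.insertBy, hx, this]
  | cons a as ih =>
      have ha : key a = false := hA a (by simp)
      simp [PySem.List.insertBy, hx, ha]
      simpa using ih (fun a h => hA a (by simp [h]))

-- Inserting an element whose key is true: it is appended at the end.
theorem pvInsertBy_true (key : String → Bool) (x : String) (hx : key x = true)
    (ys : List String) :
    PySem.List.insertBy (fun a b => decide (key a < key b)) x ys = ys ++ [x] := by
  apply PySem.List.insertBy_of_forall_not_before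
  intro b _
  simp [hx]

-- B's stable insertion sort on the boolean key computes exactly A's partition.
theorem pvSorted_partition (p : String → Bool) (xs : List String) :
    PySem.List.sorted xs (fun l => !p l) false
      = xs.filter p ++ xs.filter (fun l => !p l) := by
  rw [PySem.List.sorted_eq_foldl_insertBy]
  suffices h : ∀ (F T : List String), (∀ a ∈ F, (!p a) = false) → (∀ b ∈ T, (!p b) = true) →
      xs.foldl (fun acc x => PySem.List.insertBy (fun a b => decide ((!p a) < (!p b))) x acc) (F ++ T)
        = (F ++ xs.filter p) ++ (T ++ xs.filter (fun l => !p l)) by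
    simpa using h [] [] (by simp) (by simp)
  induction xs with
  | nil => intro F T _ _; simp
  | cons x xs ih =>
      intro F T hF hT
      by_cases h : p x = true
      · rw [List.foldl_cons, pvInsertBy_false _ x (by simp [h]) F T hF hT]
        have := ih (F ++ [x]) T
          (by intro a ha; rcases (List.mem_append.mp ha) with h' | h'
              · exact hF a h'
              · simp at h'; simp [h', h]) hT
        simp only [List.append_assoc] at this ⊢
        rw [this]
        simp [h]
      · have hx : p x = false := by simpa using h
        rw [List.foldl_cons, pvInsertBy_true _ x (by simp [hx]), List.append_assoc]
        have := ih F (T ++ [x]) hF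
          (by intro b hb; rcases (List.mem_append.mp hb) with h' | h'
              · exact hT b h'
              · simp at h'; simp [h', hx])
        rw [this]
        simp [hx, List.append_assoc]

-- ===== VERDICT (by name: the statement is the Claim_ definition above) =====
theorem remove_unused_includes_spec : Claim_equal_remove_unused_includes := by
  intro code _
  unfold Spec_remove_unused_includes remove_unused_includes remove_unused_includes_alt
  simp only [pvSorted_partition pvIsInclude, pvFoldl_partition pvIsInclude _ [] [],
    List.nil_append]
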